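-- pv_equiv track=rewrite | github.com/amassena/tennis_analysis | scripts/motionbert_lift.py | find_contiguous_segments
-- ===== SOURCE A (Python) =====
-- def find_contiguous_segments(indices, max_gap=5):
--     """Find contiguous segments in sorted frame indices, allowing small gaps."""
--     if not indices:
--         return []
--     segments = []
--     seg_start = indices[0]
--     prev = indices[0]
--     for idx in indices[1:]:
--         if idx - prev > max_gap:
--             segments.append((seg_start, prev))
--             seg_start = idx
--         prev = idx
--     segments.append((seg_start, prev))
--     return segments
-- ===== SOURCE B (Python) =====
-- def find_contiguous_segments(indices, max_gap=5):
--     """Two-phase: collect the big-gap adjacent pairs once, then assemble the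
--     segment starts (first element + each element after a big gap) and ends
--     (each element before a big gap + last element) and zip them."""
--     if not indices:
--         return []
--     cut_pairs = [(a, b) for a, b in zip(indices, indices[1:]) if b - a > max_gap]
--     starts = [indices[0]] + [b for _, b in cut_pairs]
--     ends = [a for a, _ in cut_pairs] + [indices[-1]]
--     return list(zip(starts, ends))
-- ===== Notes on version B (the rewrite author's own statement) =====
-- stated objective: alternative
-- what changed: Replaced A's incremental loop carrying (segments, seg_start, prev) state by a two-phase computation: one pass over adjacent pairs collects the big-gap cuts, from which the start list and end list are assembled and zipped into segments.
import Mathlib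
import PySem

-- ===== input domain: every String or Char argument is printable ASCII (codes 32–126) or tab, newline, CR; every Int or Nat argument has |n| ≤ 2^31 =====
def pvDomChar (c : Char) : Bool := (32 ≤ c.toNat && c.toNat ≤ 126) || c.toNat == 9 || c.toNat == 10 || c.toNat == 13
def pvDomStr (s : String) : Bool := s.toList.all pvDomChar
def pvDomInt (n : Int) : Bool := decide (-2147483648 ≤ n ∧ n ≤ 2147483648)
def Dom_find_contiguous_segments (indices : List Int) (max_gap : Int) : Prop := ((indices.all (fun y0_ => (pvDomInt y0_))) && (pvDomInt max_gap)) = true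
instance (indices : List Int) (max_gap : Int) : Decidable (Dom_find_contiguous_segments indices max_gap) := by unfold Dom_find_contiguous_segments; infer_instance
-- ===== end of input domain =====

-- B replaces A's incremental one-pass loop with a two-phase cut-pairs/starts/ends assembly (objective: alternative).


-- ===== PORT A =====
-- loop body of A's for-loop, over the state (segments, seg_start, prev)
def fcsStep (max_gap : Int) (st : List (Int × Int) × Int × Int) (idx : Int) : List (Int × Int) × Int × Int :=
  if idx - st.2.2 > max_gap then (st.1 ++ [(st.2.1, st.2.2)], idx, idx) else (st.1, st.2.1, idx)

def find_contiguous_segments (indices : List Int) (max_gap : Int) : List (Int × Int) :=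
  match indices with
  | [] => []
  | x :: rest =>
    let st := rest.foldl (fcsStep max_gap) ([], x, x)
    st.1 ++ [(st.2.1, st.2.2)]

-- ===== PORT B =====
def find_contiguous_segments_alt (indices : List Int) (max_gap : Int) : List (Int × Int) :=
  match indices with
  | [] => []
  | x :: rest =>
    -- zip(indices, indices[1:]) filtered to the big-gap pairs
    let cutPairs := ((x :: rest).zip rest).filter (fun ab => ab.2 - ab.1 > max_gap)
    let starts := x :: cutPairs.map (fun ab => ab.2)
    -- indices[-1]: the list is nonempty here
    let ends := cutPairs.map (fun ab => ab.1) ++ [(x :: rest).getLast (List.cons_ne_nil x rest)]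
    starts.zip ends

-- ===== PRECONDITION & SPEC =====
def Spec_find_contiguous_segments (indices : List Int) (max_gap : Int) (out : List (Int × Int)) : Prop := out = find_contiguous_segments_alt indices max_gap
instance (indices : List Int) (max_gap : Int) (out : List (Int × Int)) : Decidable (Spec_find_contiguous_segments indices max_gap out) := by unfold Spec_find_contiguous_segments; infer_instance

-- ===== CLAIM (what is proved, stated in full; the proofs are below) =====
def Claim_equal_find_contiguous_segments : Prop := ∀ (indices : List Int) (max_gap : Int), Dom_find_contiguous_segments indices max_gap → Spec_find_contiguous_segments indices max_gap (find_contiguous_segments indices max_gap)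

-- ===== LEMMAS AND PROOFS =====

-- A's loop plus trailing append, as a function of the full loop state
def fcsG (g : Int) (acc : List (Int × Int)) (s p : Int) (rest : List Int) : List (Int × Int) :=
  let st := rest.foldl (fcsStep g) (acc, s, p)
  st.1 ++ [(st.2.1, st.2.2)]

-- replace the start of the first segment
def repStart (s : Int) : List (Int × Int) → List (Int × Int)
  | [] => []
  | (_, b) :: t => (s, b) :: t

theorem fcsG_cons (g : Int) (acc : List (Int × Int)) (s p y : Int) (ys : List Int) :
    fcsG g acc s p (y :: ys) =
      if y - p > g then fcsG g (acc ++ [(s, p)]) y y ys else fcsG g acc s y ys := by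
  simp only [fcsG, List.foldl_cons]
  unfold fcsStep
  split_ifs <;> rfl

theorem fcsG_acc (g : Int) (rest : List Int) : ∀ (acc : List (Int × Int)) (s p : Int),
    fcsG g acc s p rest = acc ++ fcsG g [] s p rest := by
  induction rest with
  | nil => intro acc s p; simp [fcsG]
  | cons y ys ih =>
    intro acc s p
    rw [fcsG_cons, fcsG_cons]
    split_ifs with h
    · rw [ih (acc ++ [(s, p)]) y y, ih ([] ++ [(s, p)]) y y]
      simp
    · exact ih acc s y

theorem zip_head (x last : Int) (S E : List Int) :
    ∃ e t, (x :: S).zip (E ++ [last]) = (x, e) :: t := by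
  cases E with
  | nil => exact ⟨last, _, rfl⟩
  | cons c cs => exact ⟨c, _, rfl⟩

-- B on a cons starts with a segment whose start is the head
theorem alt_head (g : Int) (x : Int) (rest : List Int) :
    ∃ e t, find_contiguous_segments_alt (x :: rest) g = (x, e) :: t := by
  simp only [find_contiguous_segments_alt]
  exact zip_head _ _ _ _

-- recurrence of B at a big gap
theorem alt_cut (g p y : Int) (ys : List Int) (h : y - p > g) :
    find_contiguous_segments_alt (p :: y :: ys) g = (p, p) :: find_contiguous_segments_alt (y :: ys) g := by
  simp only [find_contiguous_segments_alt]
  simp [h, List.getLast_cons]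

-- recurrence of B at a small gap
theorem alt_nocut (g p y : Int) (ys : List Int) (h : ¬ (y - p > g)) :
    find_contiguous_segments_alt (p :: y :: ys) g = repStart p (find_contiguous_segments_alt (y :: ys) g) := by
  simp only [find_contiguous_segments_alt]
  rw [show (p :: y :: ys).zip (y :: ys) = (p, y) :: ((y :: ys).zip ys) from rfl]
  rw [List.filter_cons]
  simp only [h, decide_false, Bool.false_eq_true]
  cases hc : (((y :: ys).zip ys).filter (fun ab => decide (ab.2 - ab.1 > g))).map (fun ab => ab.1) with
  | nil => simp [hc, List.getLast_cons, repStart]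
  | cons c cs => simp [hc, List.getLast_cons, repStart]

-- main loop invariant: A's loop from (s, p) equals B on p :: rest with the first start replaced by s
theorem fcsG_eq (g : Int) (rest : List Int) : ∀ (p s : Int),
    fcsG g [] s p rest = repStart s (find_contiguous_segments_alt (p :: rest) g) := by
  induction rest with
  | nil =>
    intro p s
    simp [fcsG, find_contiguous_segments_alt, repStart]
  | cons y ys ih =>
    intro p s
    rw [fcsG_cons]
    split_ifs with h
    · rw [fcsG_acc g ys ([] ++ [(s, p)]) y y, ih y y, alt_cut g p y ys h]
      obtain ⟨e, t, he⟩ := alt_head g y ys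
      rw [he]
      simp [repStart]
    · rw [ih y s, alt_nocut g p y ys h]
      obtain ⟨e, t, he⟩ := alt_head g y ys
      rw [he]
      simp [repStart]

-- ===== VERDICT (by name: the statement is the Claim_ definition above) =====
theorem find_contiguous_segments_spec : Claim_equal_find_contiguous_segments := by
  intro indices max_gap _
  unfold Spec_find_contiguous_segments
  cases indices with
  | nil => rfl
  | cons x rest =>
    have hA : find_contiguous_segments (x :: rest) max_gap = fcsG max_gap [] x x rest := rfl
    rw [hA, fcsG_eq max_gap rest x x]
    obtain ⟨e, t, he⟩ := alt_head max_gap x rest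
    rw [he]
    simp [repStart]
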